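-- pv_equiv track=rewrite | github.com/Twingate-Labs/Twingate-CLI | libs/TGUtils.py | get_number_of_tlds_after_last_meta_char
-- ===== SOURCE A (Python) =====
-- def get_number_of_tlds_after_last_meta_char(res_definition):
--     meta_chars = ['?','*']
--     pos_list = []
--     for char in meta_chars:
--         pos = res_definition.rfind(char)
--         pos_list.append(pos)
--
--     last_meta_char_pos = max(pos_list)
--     #if last_meta_char_pos > -1:
--     post_meta_char_resource = res_definition[last_meta_char_pos+1:]
--     tlds = post_meta_char_resource.split('.')
--
--     return len(tlds)
-- ===== SOURCE B (Python) =====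
-- def get_number_of_tlds_after_last_meta_char(res_definition):
--     # single backward scan: count '.' until the last meta char (or the start)
--     count = 1
--     for ch in reversed(res_definition):
--         if ch == '?' or ch == '*':
--             break
--         if ch == '.':
--             count += 1
--     return count
-- ===== Notes on version B (the rewrite author's own statement) =====
-- stated objective: alternative
-- what changed: Replaces rfind-per-meta-char + max + slice + split with a single backward scan that counts dot characters and stops at the first meta char, building no intermediate substring or list.
import Mathlib
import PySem

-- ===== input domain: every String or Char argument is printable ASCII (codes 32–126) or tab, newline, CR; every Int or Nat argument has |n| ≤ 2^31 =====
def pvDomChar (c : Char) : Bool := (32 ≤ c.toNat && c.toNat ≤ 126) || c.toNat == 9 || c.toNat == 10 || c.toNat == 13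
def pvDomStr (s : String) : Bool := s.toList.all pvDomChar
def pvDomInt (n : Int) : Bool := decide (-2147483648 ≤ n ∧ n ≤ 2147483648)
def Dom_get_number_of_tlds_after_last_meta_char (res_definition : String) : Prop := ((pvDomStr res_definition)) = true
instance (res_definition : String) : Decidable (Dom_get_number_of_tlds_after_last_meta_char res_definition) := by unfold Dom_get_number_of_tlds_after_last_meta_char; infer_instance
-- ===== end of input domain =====

-- B replaces A's rfind-per-meta-char + max + slice + split('.') with one backward scan
-- that counts '.' characters and stops at the first meta char (objective: alternative).

-- ===== PORT A =====
def get_number_of_tlds_after_last_meta_char (res_definition : String) : Int :=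
  let meta_chars : List String := ["?", "*"]
  let pos_list : List Int :=
    meta_chars.foldl (fun acc char => acc ++ [PySem.Str.rfind res_definition char]) []
  match PySem.List.max? pos_list id with
  | none => 0  -- unreachable: meta_chars is a nonempty literal, so pos_list is nonempty
  | some last_meta_char_pos =>
    let post_meta_char_resource := PySem.Str.slice res_definition (some (last_meta_char_pos + 1)) none
    match PySem.Str.split? post_meta_char_resource "." with
    | none => 0  -- unreachable: the separator "." is nonempty
    | some tlds => PySem.List.len tlds

-- ===== PORT B =====
def pvAltGo : List Char → Int → Int
  | [], count => count
  | c :: rest, count =>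
    if c == '?' || c == '*' then count
    else pvAltGo rest (if c == '.' then count + 1 else count)

def get_number_of_tlds_after_last_meta_char_alt (res_definition : String) : Int :=
  pvAltGo res_definition.toList.reverse 1

-- ===== PRECONDITION & SPEC =====
def Spec_get_number_of_tlds_after_last_meta_char (res_definition : String) (out : Int) : Prop := out = get_number_of_tlds_after_last_meta_char_alt res_definition
instance (res_definition : String) (out : Int) : Decidable (Spec_get_number_of_tlds_after_last_meta_char res_definition out) := by unfold Spec_get_number_of_tlds_after_last_meta_char; infer_instance

-- ===== CLAIM (what is proved, stated in full; the proofs are below) =====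
def Claim_equal_get_number_of_tlds_after_last_meta_char : Prop := ∀ (res_definition : String), Dom_get_number_of_tlds_after_last_meta_char res_definition → Spec_get_number_of_tlds_after_last_meta_char res_definition (get_number_of_tlds_after_last_meta_char res_definition)

-- ===== LEMMAS AND PROOFS =====

def pvNm (c : Char) : Bool := (c != '?') && (c != '*')

theorem pvAltGo_eq (r : List Char) : ∀ (k : Int),
    pvAltGo r k = k + ((r.takeWhile pvNm).count '.' : Int) := by
  induction r with
  | nil => intro k; simp [pvAltGo]
  | cons c rest ih =>
    intro k
    have hnm : pvNm c = !(c == '?' || c == '*') := by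
      simp [pvNm, bne, Bool.not_or]
    cases h : (c == '?' || c == '*') with
    | true =>
      simp [pvAltGo, h, List.takeWhile, hnm]
    | false =>
      simp only [pvAltGo, h, Bool.false_eq_true, if_false, List.takeWhile, hnm,
        Bool.not_false, ih]
      cases hd : (c == '.') with
      | true =>
        have : c = '.' := beq_iff_eq.mp hd
        simp [this, List.count_cons]
        push_cast
        ring
      | false =>
        have : ¬ (c = '.') := by simpa using hd
        simp [List.count_cons, this, hd]

theorem pvPrefixChar (c : Char) : ∀ (s : List Char) (i : Nat),
    ([c].isPrefixOf (s.drop i)) = (s[i]? == some c) := by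
  intro s
  induction s with
  | nil => intro i; simp [List.isPrefixOf]
  | cons a t ih =>
    intro i
    cases i with
    | zero =>
      simp only [List.drop_zero, List.isPrefixOf, List.getElem?_cons_zero]
      cases hb : (c == a) with
      | true => simp [beq_iff_eq.mp hb, List.isPrefixOf]
      | false =>
        have hne : ¬ (a = c) := fun h => by simp [h] at hb
        simp [hb, hne]
    | succ j => simpa using ih j

theorem pvGoAppend (c : Char) (u v : List Char) : ∀ (j : Nat), j < u.length →
    PySem.Chars.rfind.go (u ++ v) [c] j = PySem.Chars.rfind.go u [c] j := by
  intro j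
  induction j with
  | zero =>
    intro hj
    rw [PySem.Chars.rfind.go.eq_def, PySem.Chars.rfind.go.eq_def]
    have h1 := pvPrefixChar c (u ++ v) 0
    have h2 := pvPrefixChar c u 0
    simp only [List.drop_zero] at h1 h2
    rw [h1, h2, List.getElem?_append_left hj]
  | succ j ih =>
    intro hj
    rw [PySem.Chars.rfind.go.eq_def, PySem.Chars.rfind.go.eq_def]
    simp only
    rw [pvPrefixChar, pvPrefixChar, List.getElem?_append_left hj]
    cases h : (u[j + 1]? == some c) with
    | true => simp [h]
    | false => simp [h, ih (by omega)]

theorem pvRfindChar (c : Char) (s : List Char) :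
    PySem.Chars.rfind s [c] =
      (s.length : Int) - ((s.reverse.takeWhile (fun x => x != c)).length : Int) - 1 := by
  induction s using List.reverseRecOn with
  | nil => simp [PySem.Chars.rfind, PySem.Chars.rfind.go, List.isPrefixOf]
  | append_singleton u d ih =>
    unfold PySem.Chars.rfind
    rw [show (u ++ [d]).length = u.length + 1 by simp]
    rw [PySem.Chars.rfind.go.eq_def]
    simp only
    have hpd : ([c].isPrefixOf (List.drop (u.length + 1) (u ++ [d]))) = false := by
      rw [pvPrefixChar]; simp
    rw [hpd]
    simp only [Bool.false_eq_true, if_false]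
    by_cases hdc : d = c
    · -- last char is c
      have hgo : PySem.Chars.rfind.go (u ++ [d]) [c] u.length = (u.length : Int) := by
        rw [PySem.Chars.rfind.go.eq_def]
        cases u with
        | nil => simp [List.isPrefixOf, hdc]
        | cons a t =>
          simp only [List.length_cons]
          rw [pvPrefixChar]
          have : ((a :: t) ++ [d])[t.length + 1]? = some d := by
            rw [show t.length + 1 = (a :: t).length by simp]
            simp
          rw [this]
          simp [hdc]
      rw [hgo]
      have : ((u ++ [d]).reverse.takeWhile (fun x => x != c)) = [] := by
        simp [List.takeWhile, hdc]
      rw [this]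
      simp
    · -- last char is not c
      have hstep : PySem.Chars.rfind.go (u ++ [d]) [c] u.length
          = PySem.Chars.rfind.go u [c] u.length := by
        cases u with
        | nil =>
          rw [PySem.Chars.rfind.go.eq_def, PySem.Chars.rfind.go.eq_def]
          have hcd : ¬ (c = d) := fun h => hdc h.symm
          simp [List.isPrefixOf, hcd]
        | cons a t =>
          rw [PySem.Chars.rfind.go.eq_def, PySem.Chars.rfind.go.eq_def (s := a :: t)]
          simp only [List.length_cons]
          rw [pvPrefixChar, pvPrefixChar]
          have h1 : ((a :: t) ++ [d])[t.length + 1]? = some d := by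
            rw [show t.length + 1 = (a :: t).length by simp]
            simp
          have h2 : (a :: t)[t.length + 1]? = none := by simp
          rw [h1, h2]
          have hda : (some d == some c) = false := by simp [hdc]
          rw [hda]
          simp only [Bool.false_eq_true, if_false]
          have := pvGoAppend c (a :: t) [d] t.length (by simp)
          simpa using this
      rw [hstep]
      unfold PySem.Chars.rfind at ih
      rw [ih]
      have htw : ((u ++ [d]).reverse.takeWhile (fun x => x != c)) =
          d :: (u.reverse.takeWhile (fun x => x != c)) := by
        simp [List.takeWhile, hdc]
      rw [htw]
      simp

theorem pvTakeWhileMin (p q : Char → Bool) (r : List Char) :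
    ((r.takeWhile (fun x => p x && q x)).length) =
      min (r.takeWhile p).length (r.takeWhile q).length := by
  induction r with
  | nil => simp
  | cons a t ih =>
    cases hp : p a <;> cases hq : q a <;>
      simp [List.takeWhile, hp, hq, ih] <;> omega

theorem pvSplitGoLen (c : Char) : ∀ (fuel : Nat) (l cur : List Char) (acc : List (List Char)),
    l.length < fuel →
    (PySem.Chars.splitOn.go [c] fuel l cur acc).length = acc.length + 1 + l.count c := by
  intro fuel
  induction fuel with
  | zero => intro l cur acc h; omega
  | succ fuel ih =>
    intro l cur acc h
    cases l with
    | nil => rw [PySem.Chars.splitOn.go.eq_def]; simp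
    | cons a rest =>
      rw [PySem.Chars.splitOn.go.eq_def]
      simp only
      have hpfx : ([c].isPrefixOf (a :: rest)) = (a == c) := by
        have h0 := pvPrefixChar c (a :: rest) 0
        simp only [List.drop_zero, List.getElem?_cons_zero] at h0
        rw [h0]
        simp
      rw [hpfx]
      cases hb : (a == c) with
      | false =>
        simp only [Bool.false_eq_true, if_false]
        rw [ih rest (a :: cur) acc (by simp at h ⊢; omega)]
        simp [List.count_cons, hb]
      | true =>
        simp only [if_true]
        have hdrop : List.drop ([c].length) (a :: rest) = rest := by simp
        rw [hdrop, ih rest [] (cur.reverse :: acc) (by simp at h ⊢; omega)]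
        have : a = c := beq_iff_eq.mp hb
        simp [List.count_cons, this]
        omega

theorem pvSplitOnLen (c : Char) (t : List Char) :
    (PySem.Chars.splitOn t [c]).length = t.count c + 1 := by
  unfold PySem.Chars.splitOn
  rw [pvSplitGoLen c (t.length + 1) t [] [] (by omega)]
  simp
  omega

theorem pvMain (s : String) :
    get_number_of_tlds_after_last_meta_char s = get_number_of_tlds_after_last_meta_char_alt s := by
  have hq := pvRfindChar '?' s.toList
  have hst := pvRfindChar '*' s.toList
  have htw_min := pvTakeWhileMin (fun x => x != '?') (fun x => x != '*') s.toList.reverse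
  have ht1le : (s.toList.reverse.takeWhile (fun x => x != '?')).length ≤ s.toList.length := by
    have := (List.takeWhile_prefix (l := s.toList.reverse) (fun x => x != '?')).length_le
    simpa using this
  have ht2le : (s.toList.reverse.takeWhile (fun x => x != '*')).length ≤ s.toList.length := by
    have := (List.takeWhile_prefix (l := s.toList.reverse) (fun x => x != '*')).length_le
    simpa using this
  have hnm : pvNm = (fun x => (x != '?') && (x != '*')) := rfl
  have htwle : (s.toList.reverse.takeWhile pvNm).length ≤ s.toList.length := by
    rw [hnm, htw_min]; omega
  unfold get_number_of_tlds_after_last_meta_char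
  simp only [List.foldl, List.nil_append]
  have hmax : PySem.List.max? ([PySem.Str.rfind s "?"] ++ [PySem.Str.rfind s "*"]) id =
      some (max (PySem.Str.rfind s "?") (PySem.Str.rfind s "*")) := by
    simp only [PySem.List.max?, List.foldl, List.foldl_nil, List.foldl_cons, id_eq, List.singleton_append]
    rcases lt_or_ge (PySem.Str.rfind s "?") (PySem.Str.rfind s "*") with h | h
    · rw [if_pos h, max_eq_right h.le]
    · rw [if_neg (not_lt.2 h), max_eq_left h]
  rw [hmax]
  simp only
  have hrq : PySem.Str.rfind s "?" =
      (s.toList.length : Int) - ((s.toList.reverse.takeWhile (fun x => x != '?')).length : Int) - 1 := by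
    unfold PySem.Str.rfind
    rw [show ("?" : String).toList = ['?'] by decide, hq]
  have hrst : PySem.Str.rfind s "*" =
      (s.toList.length : Int) - ((s.toList.reverse.takeWhile (fun x => x != '*')).length : Int) - 1 := by
    unfold PySem.Str.rfind
    rw [show ("*" : String).toList = ['*'] by decide, hst]
  have hm : max (PySem.Str.rfind s "?") (PySem.Str.rfind s "*") + 1 =
      ((s.toList.length - (s.toList.reverse.takeWhile pvNm).length : Nat) : Int) := by
    rw [hrq, hrst, Nat.cast_sub htwle]
    have hmineq : (((s.toList.reverse.takeWhile pvNm).length : Nat) : Int) =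
        min ((s.toList.reverse.takeWhile (fun x => x != '?')).length : Int)
            ((s.toList.reverse.takeWhile (fun x => x != '*')).length : Int) := by
      rw [hnm, htw_min]
      push_cast
      rfl
    omega
  rw [hm]
  have hslice : (PySem.Str.slice s
      (some ((s.toList.length - (s.toList.reverse.takeWhile pvNm).length : Nat) : Int)) none).toList =
      List.drop (s.toList.length - (s.toList.reverse.takeWhile pvNm).length) s.toList := by
    rw [PySem.Str.toList_slice, PySem.Chars.slice_eq_listSlice]
    rw [PySem.List.slice_from s.toList (by positivity)]
    simp
  unfold PySem.Str.split? PySem.Chars.split?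
  rw [show ("." : String).toList = ['.'] by decide]
  simp only [List.isEmpty_cons, Bool.false_eq_true, if_false, Option.map_some]
  rw [PySem.List.len_eq]
  simp only [List.length_map]
  rw [hslice, pvSplitOnLen]
  have htail : List.drop (s.toList.length - (s.toList.reverse.takeWhile pvNm).length) s.toList =
      ((s.toList.reverse.takeWhile pvNm)).reverse := by
    have h1 : s.toList.reverse.takeWhile pvNm =
        s.toList.reverse.take ((s.toList.reverse.takeWhile pvNm).length) := by
      exact List.prefix_iff_eq_take.mp (List.takeWhile_prefix pvNm)
    conv_rhs => rw [h1]
    rw [List.take_reverse]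
    simp
  rw [htail, List.count_reverse]
  unfold get_number_of_tlds_after_last_meta_char_alt
  rw [pvAltGo_eq]
  push_cast
  ring

-- ===== VERDICT (by name: the statement is the Claim_ definition above) =====
theorem get_number_of_tlds_after_last_meta_char_spec : Claim_equal_get_number_of_tlds_after_last_meta_char := by
  intro s _
  unfold Spec_get_number_of_tlds_after_last_meta_char
  exact pvMain s
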